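-- pv_equiv track=rewrite | github.com/jackgrauer/CHONKER_SNYFTER | generate_viewer.py | generate_faithful_content
-- ===== SOURCE A (Python) =====
-- from typing import Dict, List, Optional, Any
--
-- def markdown_table_to_html(table_lines: List[str]) -> str:
--     """
--     Convert markdown table lines to proper HTML table.
--     """
--     if not table_lines:
--         return ""
--
--     # Remove empty lines
--     table_lines = [line for line in table_lines if line.strip()]
--
--     if len(table_lines) < 2:
--         return ""
--
--     html = '<table class="faithful-table">'
--
--     # Process header row
--     header_row = table_lines[0].strip()
--     if header_row.startswith('|') and header_row.endswith('|'):
--         header_cells = [cell.strip() for cell in header_row[1:-1].split('|')]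
--         html += '<thead><tr>'
--         for cell in header_cells:
--             html += f'<th>{cell}</th>'
--         html += '</tr></thead>'
--
--     # Skip separator row (usually second row with dashes)
--     data_rows = table_lines[2:] if len(table_lines) > 2 else []
--
--     if data_rows:
--         html += '<tbody>'
--         for row in data_rows:
--             row = row.strip()
--             if row.startswith('|') and row.endswith('|'):
--                 cells = [cell.strip() for cell in row[1:-1].split('|')]
--                 html += '<tr>'
--                 for cell in cells:
--                     html += f'<td>{cell}</td>'
--                 html += '</tr>'
--         html += '</tbody>'
--
--     html += '</table>'
--     return html
--
-- def generate_faithful_content(document_text: str, tables: List[Dict]) -> str: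
--     """
--     Generate faithful reproduction of document content with editing capabilities.
--     """
--     lines = document_text.split('\n')
--     faithful_content = ""
--
--     # Group lines into table sections
--     current_table_lines = []
--     section_id = 0
--
--     for line in lines:
--         if line.strip().startswith('|'):
--             current_table_lines.append(line)
--         else:
--             # If we have accumulated table lines, create a table section
--             if current_table_lines:
--                 table_html = markdown_table_to_html(current_table_lines)
--                 faithful_content += f'''
--                 <div class="editable-section" data-section="table-{section_id}">
--                     <div class="edit-overlay" onclick="editSection('table-{section_id}')">Edit</div>
--                     <div class="section-content" id="table-{section_id}">
--                         <div class="table-container">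
--                             {table_html}
--                         </div>
--                     </div>
--                 </div>
--                 '''
--                 current_table_lines = []
--                 section_id += 1
--
--             # Add non-table content if it's not empty
--             if line.strip():
--                 faithful_content += f'''
--                 <div class="editable-section" data-section="text-{section_id}">
--                     <div class="edit-overlay" onclick="editSection('text-{section_id}')">Edit</div>
--                     <div class="section-content" id="text-{section_id}">{line}</div>
--                 </div>
--                 '''
--                 section_id += 1
--
--     # Handle remaining table lines
--     if current_table_lines:
--         table_html = markdown_table_to_html(current_table_lines)
--         faithful_content += f'''
--         <div class="editable-section" data-section="table-{section_id}">
--             <div class="edit-overlay" onclick="editSection('table-{section_id}')">Edit</div>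
--             <div class="section-content" id="table-{section_id}">
--                 <div class="table-container">
--                     {table_html}
--                 </div>
--             </div>
--         </div>
--         '''
--
--     return faithful_content
-- ===== SOURCE B (Python) =====
-- from typing import Dict, List
--
-- def markdown_table_to_html(table_lines: List[str]) -> str:
--     if not table_lines:
--         return ""
--     table_lines = [line for line in table_lines if line.strip()]
--     if len(table_lines) < 2:
--         return ""
--     html = '<table class="faithful-table">'
--     header_row = table_lines[0].strip()
--     if header_row.startswith('|') and header_row.endswith('|'):
--         header_cells = [cell.strip() for cell in header_row[1:-1].split('|')]
--         html += '<thead><tr>'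
--         for cell in header_cells:
--             html += f'<th>{cell}</th>'
--         html += '</tr></thead>'
--     data_rows = table_lines[2:] if len(table_lines) > 2 else []
--     if data_rows:
--         html += '<tbody>'
--         for row in data_rows:
--             row = row.strip()
--             if row.startswith('|') and row.endswith('|'):
--                 cells = [cell.strip() for cell in row[1:-1].split('|')]
--                 html += '<tr>'
--                 for cell in cells:
--                     html += f'<td>{cell}</td>'
--                 html += '</tr>'
--         html += '</tbody>'
--     html += '</table>'
--     return html
--
-- def _segments(lines):
--     """Group consecutive '|'-lines into table runs; keep non-empty plain lines as text."""
--     segments = []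
--     run = []
--     for line in lines:
--         if line.strip().startswith('|'):
--             run.append(line)
--             continue
--         if run:
--             segments.append(('table', run))
--             run = []
--         if line.strip():
--             segments.append(('text', line))
--     if run:
--         segments.append(('table', run))
--     return segments
--
-- def generate_faithful_content(document_text: str, tables: List[Dict]) -> str:
--     parts = []
--     for sid, (kind, payload) in enumerate(_segments(document_text.split('\n'))):
--         if kind == 'table':
--             table_html = markdown_table_to_html(payload)
--             parts.append(f'''
--                 <div class="editable-section" data-section="table-{sid}">
--                     <div class="edit-overlay" onclick="editSection('table-{sid}')">Edit</div>
--                     <div class="section-content" id="table-{sid}">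
--                         <div class="table-container">
--                             {table_html}
--                         </div>
--                     </div>
--                 </div>
--                 ''')
--         else:
--             parts.append(f'''
--                 <div class="editable-section" data-section="text-{sid}">
--                     <div class="edit-overlay" onclick="editSection('text-{sid}')">Edit</div>
--                     <div class="section-content" id="text-{sid}">{payload}</div>
--                 </div>
--                 ''')
--     return ''.join(parts)
-- ===== Notes on version B (the rewrite author's own statement) =====
-- stated objective: alternative
-- what changed: B separates parsing from rendering: one pass groups lines into tagged (table/text) segments, then an enumerate-and-join pass renders each segment with a single table template, instead of A's single loop that interleaves table-run accumulation, id bookkeeping and string emission and carries a second differently-indented copy of the table template for a trailing run.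
-- intended difference: On documents whose last line strips to a string starting with '|', A renders the trailing table section through a second copy of the template with 8-space instead of 16-space indentation (a copy-paste artefact); B renders every table section with the one uniform template, which is the intended markup. — e.g. on generate_faithful_content("|a|\n|b|", []): A returns "\n <div class=\"editable-section\" data-section=\"table-0\">\n <div class=\"edit-overlay\" onclick=\"editSection('tabl…, B returns "\n <div class=\"editable-section\" data-section=\"table-0\">\n <div class=\"edit-overlay\" onclick=\"editSection('tabl…
import Mathlib
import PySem

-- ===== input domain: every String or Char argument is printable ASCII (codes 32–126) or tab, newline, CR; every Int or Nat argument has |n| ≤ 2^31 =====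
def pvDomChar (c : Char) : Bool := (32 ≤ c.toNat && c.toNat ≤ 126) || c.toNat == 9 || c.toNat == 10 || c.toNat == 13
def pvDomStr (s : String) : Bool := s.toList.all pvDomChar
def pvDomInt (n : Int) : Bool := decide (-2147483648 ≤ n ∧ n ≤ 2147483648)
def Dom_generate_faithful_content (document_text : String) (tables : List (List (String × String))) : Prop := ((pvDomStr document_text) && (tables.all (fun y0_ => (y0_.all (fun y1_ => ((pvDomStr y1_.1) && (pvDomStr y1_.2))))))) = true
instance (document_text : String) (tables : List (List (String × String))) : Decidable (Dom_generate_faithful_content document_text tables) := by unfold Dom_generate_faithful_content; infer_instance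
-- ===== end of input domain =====

-- B separates parsing (one pass grouping lines into table/text segments) from rendering
-- (enumerate + join over the segment list) and uses ONE table template; A interleaves
-- grouping, id bookkeeping and emission in a single loop and renders a trailing table run
-- through a second, differently indented copy of the template.  Objective: alternative.

-- ===== PORT A =====
-- the f-string templates
def tableSection (sid : Int) (x : String) : String :=
  let s := PySem.Int.toStr sid
  "\n                <div class=\"editable-section\" data-section=\"table-" ++ s ++ "\">\n                    <div class=\"edit-overlay\" onclick=\"editSection('table-" ++ s ++ "')\">Edit</div>\n                    <div class=\"section-content\" id=\"table-" ++ s ++ "\">\n                        <div class=\"table-container\">\n                            " ++ x ++ "\n                        </div>\n                    </div>\n                </div>\n                "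

def textSection (sid : Int) (x : String) : String :=
  let s := PySem.Int.toStr sid
  "\n                <div class=\"editable-section\" data-section=\"text-" ++ s ++ "\">\n                    <div class=\"edit-overlay\" onclick=\"editSection('text-" ++ s ++ "')\">Edit</div>\n                    <div class=\"section-content\" id=\"text-" ++ s ++ "\">" ++ x ++ "</div>\n                </div>\n                "

-- A's trailing-table f-string (indented differently in the source)
def tailTableSection (sid : Int) (x : String) : String :=
  let s := PySem.Int.toStr sid
  "\n        <div class=\"editable-section\" data-section=\"table-" ++ s ++ "\">\n            <div class=\"edit-overlay\" onclick=\"editSection('table-" ++ s ++ "')\">Edit</div>\n            <div class=\"section-content\" id=\"table-" ++ s ++ "\">\n                <div class=\"table-container\">\n                    " ++ x ++ "\n                </div>\n            </div>\n        </div>\n        "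

-- literal port of markdown_table_to_html (identical helper in Source A and Source B)
def markdownTableToHtml (table_lines : List String) : String :=
  if table_lines = [] then ""
  else
    let tl := table_lines.filter (fun l => PySem.Str.strip l ≠ "")
    if tl.length < 2 then ""
    else
      let html := "<table class=\"faithful-table\">"
      let header_row := PySem.Str.strip (tl.headD "")
      let html :=
        if PySem.Str.startswith header_row "|" && PySem.Str.endswith header_row "|" then
          let header_cells := (((PySem.Str.split? (PySem.Str.slice header_row (some 1) (some (-1))) "|").getD [])).map PySem.Str.strip
          let html := html ++ "<thead><tr>"
          let html := header_cells.foldl (fun h cell => h ++ "<th>" ++ cell ++ "</th>") html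
          html ++ "</tr></thead>"
        else html
      let data_rows := if tl.length > 2 then PySem.List.slice tl (some 2) none else []
      let html :=
        if data_rows ≠ [] then
          let html := html ++ "<tbody>"
          let html := data_rows.foldl (fun h row =>
            let row := PySem.Str.strip row
            if PySem.Str.startswith row "|" && PySem.Str.endswith row "|" then
              let cells := (((PySem.Str.split? (PySem.Str.slice row (some 1) (some (-1))) "|").getD [])).map PySem.Str.strip
              let h := h ++ "<tr>"
              (cells.foldl (fun h cell => h ++ "<td>" ++ cell ++ "</td>") h) ++ "</tr>"
            else h) html
          html ++ "</tbody>"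
        else html
      html ++ "</table>"

-- one iteration of A's loop over lines: state = (faithful_content, current_table_lines, section_id)
def gfcStep (st : String × List String × Int) (line : String) : String × List String × Int :=
  if PySem.Str.startswith (PySem.Str.strip line) "|" then (st.1, st.2.1 ++ [line], st.2.2)
  else
    let acc1 := if st.2.1 ≠ [] then st.1 ++ tableSection st.2.2 (markdownTableToHtml st.2.1) else st.1
    let sid1 := if st.2.1 ≠ [] then st.2.2 + 1 else st.2.2
    if PySem.Str.strip line ≠ "" then (acc1 ++ textSection sid1 line, [], sid1 + 1)
    else (acc1, [], sid1)

def generate_faithful_content (document_text : String) (tables : List (List (String × String))) : String :=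
  let lines := ((PySem.Str.split? document_text "\n").getD [])
  let st := lines.foldl gfcStep ("", [], 0)
  if st.2.1 ≠ [] then st.1 ++ tailTableSection st.2.2 (markdownTableToHtml st.2.1) else st.1

-- ===== PORT B =====
-- a tagged segment: a run of table lines, or one non-empty text line
inductive GfcSeg where
  | table : List String → GfcSeg
  | text : String → GfcSeg
deriving DecidableEq, Repr

-- _segments' loop body: state = (segments, run)
def gfcSegStep (st : List GfcSeg × List String) (line : String) : List GfcSeg × List String :=
  if PySem.Str.startswith (PySem.Str.strip line) "|" then (st.1, st.2 ++ [line])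
  else
    let segs1 := if st.2 ≠ [] then st.1 ++ [GfcSeg.table st.2] else st.1
    let segs2 := if PySem.Str.strip line ≠ "" then segs1 ++ [GfcSeg.text line] else segs1
    (segs2, ([] : List String))

def gfcSegments (lines : List String) : List GfcSeg :=
  let st := lines.foldl gfcSegStep ([], [])
  if st.2 ≠ [] then st.1 ++ [GfcSeg.table st.2] else st.1

-- the body of B's enumerate loop
def gfcRender (sid : Int) : GfcSeg → String
  | GfcSeg.table run => tableSection sid (markdownTableToHtml run)
  | GfcSeg.text line => textSection sid line

def generate_faithful_content_alt (document_text : String) (tables : List (List (String × String))) : String :=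
  PySem.Str.join ""
    ((PySem.List.enumerate (gfcSegments ((PySem.Str.split? document_text "\n").getD [])) 0).map
      (fun p => gfcRender p.1 p.2))

-- ===== PRECONDITION & SPEC =====
-- On documents whose last line strips to a string starting with '|', A renders the trailing
-- table run through a second, differently indented copy of the table template (8-space
-- instead of 16-space indentation) — a copy-paste artefact; B renders every table section
-- with the one template, the intended uniform markup.
def pvLastLine (cs : List Char) : List Char := (cs.reverse.takeWhile (fun c => !(c == '\n'))).reverse

def D_generate_faithful_content (document_text : String) (tables : List (List (String × String))) : Prop :=
  ((pvLastLine document_text.toList).dropWhile PySem.Chars.isspace).head? = some '|'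
instance (document_text : String) (tables : List (List (String × String))) : Decidable (D_generate_faithful_content document_text tables) := by unfold D_generate_faithful_content; infer_instance

def Spec_generate_faithful_content (document_text : String) (tables : List (List (String × String))) (out : String) : Prop := ¬ D_generate_faithful_content document_text tables → out = generate_faithful_content_alt document_text tables
instance (document_text : String) (tables : List (List (String × String))) (out : String) : Decidable (Spec_generate_faithful_content document_text tables out) := by unfold Spec_generate_faithful_content; infer_instance

def pvDiffWitness_generate_faithful_content : String × (List (List (String × String))) := ("|a|\n|b|", [])
def pvDiffWitnessOut_generate_faithful_content : String × String :=
  ("\n        <div class=\"editable-section\" data-section=\"table-0\">\n            <div class=\"edit-overlay\" onclick=\"editSection('table-0')\">Edit</div>\n            <div class=\"section-content\" id=\"table-0\">\n                <div class=\"table-container\">\n                    <table class=\"faithful-table\"><thead><tr><th>a</th></tr></thead></table>\n                </div>\n            </div>\n        </div>\n        ",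
   "\n                <div class=\"editable-section\" data-section=\"table-0\">\n                    <div class=\"edit-overlay\" onclick=\"editSection('table-0')\">Edit</div>\n                    <div class=\"section-content\" id=\"table-0\">\n                        <div class=\"table-container\">\n                            <table class=\"faithful-table\"><thead><tr><th>a</th></tr></thead></table>\n                        </div>\n                    </div>\n                </div>\n                ")

-- ===== CLAIM (what is proved, stated in full; the proofs are below) =====
def Claim_unchanged_generate_faithful_content : Prop := ∀ (document_text : String) (tables : List (List (String × String))), Dom_generate_faithful_content document_text tables → Spec_generate_faithful_content document_text tables (generate_faithful_content document_text tables)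
def Claim_changed_generate_faithful_content : Prop := Dom_generate_faithful_content (pvDiffWitness_generate_faithful_content.1) (pvDiffWitness_generate_faithful_content.2) ∧ D_generate_faithful_content (pvDiffWitness_generate_faithful_content.1) (pvDiffWitness_generate_faithful_content.2) ∧ generate_faithful_content (pvDiffWitness_generate_faithful_content.1) (pvDiffWitness_generate_faithful_content.2) = pvDiffWitnessOut_generate_faithful_content.1 ∧ generate_faithful_content_alt (pvDiffWitness_generate_faithful_content.1) (pvDiffWitness_generate_faithful_content.2) = pvDiffWitnessOut_generate_faithful_content.2 ∧ pvDiffWitnessOut_generate_faithful_content.1 ≠ pvDiffWitnessOut_generate_faithful_content.2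
def Claim_exact_generate_faithful_content : Prop := ∀ (document_text : String) (tables : List (List (String × String))), Dom_generate_faithful_content document_text tables → D_generate_faithful_content document_text tables → generate_faithful_content document_text tables ≠ generate_faithful_content_alt document_text tables


-- ===== LEMMAS AND PROOFS =====

-- proof-only segment type: like GfcSeg but marking A's trailing table run separately
inductive SegT where
  | table : List String → SegT
  | text : String → SegT
  | tail : List String → SegT
deriving DecidableEq, Repr

def isTail : SegT → Bool
  | SegT.tail _ => true
  | _ => false

def toB : SegT → GfcSeg
  | SegT.table r => GfcSeg.table r
  | SegT.text l => GfcSeg.text l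
  | SegT.tail r => GfcSeg.table r

-- the segment list produced from pending run `cur`, A-style (trailing run marked `tail`)
def segsFromT : List String → List String → List SegT
  | cur, [] => if cur ≠ [] then [SegT.tail cur] else []
  | cur, line :: rest =>
    if PySem.Str.startswith (PySem.Str.strip line) "|" then segsFromT (cur ++ [line]) rest
    else ((if cur ≠ [] then [SegT.table cur] else []) ++
          (if PySem.Str.strip line ≠ "" then [SegT.text line] else [])) ++ segsFromT [] rest

-- the same list, B-style (trailing run is an ordinary table)
def segsFromB : List String → List String → List GfcSeg
  | cur, [] => if cur ≠ [] then [GfcSeg.table cur] else []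
  | cur, line :: rest =>
    if PySem.Str.startswith (PySem.Str.strip line) "|" then segsFromB (cur ++ [line]) rest
    else ((if cur ≠ [] then [GfcSeg.table cur] else []) ++
          (if PySem.Str.strip line ≠ "" then [GfcSeg.text line] else [])) ++ segsFromB [] rest

def renderA (sid : Int) : SegT → String
  | SegT.table r => tableSection sid (markdownTableToHtml r)
  | SegT.text l => textSection sid l
  | SegT.tail r => tailTableSection sid (markdownTableToHtml r)

def emitA : List SegT → Int → String
  | [], _ => ""
  | s :: rest, sid => renderA sid s ++ emitA rest (sid + 1)

def emitB : List GfcSeg → Int → String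
  | [], _ => ""
  | s :: rest, sid => gfcRender sid s ++ emitB rest (sid + 1)

def flushSegs (st : List GfcSeg × List String) : List GfcSeg :=
  if st.2 ≠ [] then st.1 ++ [GfcSeg.table st.2] else st.1

def finishA (st : String × List String × Int) : String :=
  if st.2.1 ≠ [] then st.1 ++ tailTableSection st.2.2 (markdownTableToHtml st.2.1) else st.1

lemma map_toB_segsFromT (lines : List String) : ∀ cur, (segsFromT cur lines).map toB = segsFromB cur lines := by
  induction lines with
  | nil => intro cur; by_cases h : cur = [] <;> simp [segsFromT, segsFromB, h, toB]
  | cons line rest ih =>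
      intro cur
      simp only [segsFromT, segsFromB]
      by_cases hb : PySem.Str.startswith (PySem.Str.strip line) "|" = true
      · rw [if_pos hb, if_pos hb]; exact ih _
      · rw [if_neg hb, if_neg hb]
        by_cases hc : cur = [] <;> by_cases he : PySem.Str.strip line = "" <;>
          simp [hc, he, toB, ih]

lemma segLoop_eq (lines : List String) (segs : List GfcSeg) (run : List String) :
    flushSegs (lines.foldl gfcSegStep (segs, run)) = segs ++ segsFromB run lines := by
  induction lines generalizing segs run with
  | nil =>
      simp only [List.foldl_nil, flushSegs, segsFromB]
      by_cases h : run = [] <;> simp [h]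
  | cons line rest ih =>
      rw [List.foldl_cons]
      by_cases hb : PySem.Str.startswith (PySem.Str.strip line) "|" = true
      · have hstep : gfcSegStep (segs, run) line = (segs, run ++ [line]) := by
          unfold gfcSegStep; rw [if_pos hb]
        rw [hstep, ih]
        simp only [segsFromB]
        rw [if_pos hb]
      · have hstep : gfcSegStep (segs, run) line
            = ((if run ≠ [] then segs ++ [GfcSeg.table run] else segs)
                ++ (if PySem.Str.strip line ≠ "" then [GfcSeg.text line] else []), []) := by
          unfold gfcSegStep
          rw [if_neg hb]
          by_cases hr : run = [] <;> by_cases he : PySem.Str.strip line = "" <;> simp [hr, he]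
        rw [hstep, ih]
        simp only [segsFromB]
        rw [if_neg hb]
        by_cases hr : run = [] <;> simp [hr, List.append_assoc]

lemma aLoop_eq (lines : List String) (acc : String) (cur : List String) (sid : Int) :
    finishA (lines.foldl gfcStep (acc, cur, sid)) = acc ++ emitA (segsFromT cur lines) sid := by
  induction lines generalizing acc cur sid with
  | nil =>
      simp only [List.foldl_nil, finishA, segsFromT]
      by_cases h : cur = [] <;> simp [h, emitA, renderA]
  | cons line rest ih =>
      rw [List.foldl_cons]
      by_cases hb : PySem.Str.startswith (PySem.Str.strip line) "|" = true
      · have hstep : gfcStep (acc, cur, sid) line = (acc, cur ++ [line], sid) := by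
          unfold gfcStep; rw [if_pos hb]
        rw [hstep, ih]
        simp only [segsFromT]
        rw [if_pos hb]
      · simp only [segsFromT]
        rw [if_neg hb]
        by_cases hr : cur = []
        · by_cases he : PySem.Str.strip line = ""
          · have hstep : gfcStep (acc, cur, sid) line = (acc, [], sid) := by
              unfold gfcStep; rw [if_neg hb]; simp [hr, he]
            rw [hstep, ih]
            simp [hr, he]
          · have hstep : gfcStep (acc, cur, sid) line
                = (acc ++ textSection sid line, [], sid + 1) := by
              unfold gfcStep; rw [if_neg hb]; simp [hr, he]
            rw [hstep, ih]
            simp only [hr, he, ne_eq, not_true_eq_false, not_false_eq_true, if_neg, if_pos,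
              List.nil_append]
            show acc ++ textSection sid line ++ emitA (segsFromT [] rest) (sid + 1)
              = acc ++ emitA (SegT.text line :: segsFromT [] rest) sid
            rw [show emitA (SegT.text line :: segsFromT [] rest) sid
                  = renderA sid (SegT.text line) ++ emitA (segsFromT [] rest) (sid + 1) from rfl]
            rw [String.append_assoc]
            simp [renderA]
        · by_cases he : PySem.Str.strip line = ""
          · have hstep : gfcStep (acc, cur, sid) line
                = (acc ++ tableSection sid (markdownTableToHtml cur), [], sid + 1) := by
              unfold gfcStep; rw [if_neg hb]; simp [hr, he]
            rw [hstep, ih]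
            simp only [hr, he, ne_eq, not_true_eq_false, not_false_eq_true, if_neg, if_pos,
              List.append_nil]
            show acc ++ tableSection sid (markdownTableToHtml cur) ++ emitA (segsFromT [] rest) (sid + 1)
              = acc ++ emitA (SegT.table cur :: segsFromT [] rest) sid
            rw [show emitA (SegT.table cur :: segsFromT [] rest) sid
                  = renderA sid (SegT.table cur) ++ emitA (segsFromT [] rest) (sid + 1) from rfl]
            rw [String.append_assoc]
            simp [renderA]
          · have hstep : gfcStep (acc, cur, sid) line
                = (acc ++ tableSection sid (markdownTableToHtml cur) ++ textSection (sid + 1) line,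
                   [], sid + 1 + 1) := by
              unfold gfcStep; rw [if_neg hb]; simp [hr, he]
            rw [hstep, ih]
            simp only [hr, he, ne_eq, not_false_eq_true, if_pos]
            show acc ++ tableSection sid (markdownTableToHtml cur) ++ textSection (sid + 1) line
                   ++ emitA (segsFromT [] rest) (sid + 1 + 1)
              = acc ++ emitA (SegT.table cur :: SegT.text line :: segsFromT [] rest) sid
            rw [show emitA (SegT.table cur :: SegT.text line :: segsFromT [] rest) sid
                  = renderA sid (SegT.table cur)
                    ++ (renderA (sid + 1) (SegT.text line)
                    ++ emitA (segsFromT [] rest) (sid + 1 + 1)) from rfl]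
            rw [String.append_assoc, String.append_assoc]
            simp [renderA]

lemma joinEmit (segs : List GfcSeg) : ∀ (k : Int),
    PySem.Str.join "" ((PySem.List.enumerate segs k).map (fun p => gfcRender p.1 p.2)) = emitB segs k := by
  induction segs with
  | nil =>
      intro k
      apply String.toList_inj.mp
      rw [PySem.Str.toList_join]
      simp [PySem.List.enumerate_nil, emitB, PySem.Chars.join_nil]
  | cons s rest ih =>
      intro k
      rw [PySem.List.enumerate_cons]
      cases rest with
      | nil =>
          apply String.toList_inj.mp
          rw [PySem.Str.toList_join]
          simp [PySem.List.enumerate_nil, emitB, PySem.Chars.join_singleton]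
      | cons t r =>
          rw [show emitB (s :: t :: r) k = gfcRender k s ++ emitB (t :: r) (k + 1) from rfl,
              ← ih (k + 1), PySem.List.enumerate_cons]
          apply String.toList_inj.mp
          rw [String.toList_append, PySem.Str.toList_join, PySem.Str.toList_join]
          simp only [List.map_cons]
          rw [PySem.Chars.join_cons_cons]
          simp

lemma emit_map (l : List SegT) : ∀ (sid : Int), (∀ s ∈ l, isTail s = false) →
    emitA l sid = emitB (l.map toB) sid := by
  induction l with
  | nil => intro sid _; rfl
  | cons s rest ih =>
      intro sid h
      have hs := h s (List.mem_cons_self ..)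
      have hrest : ∀ x ∈ rest, isTail x = false := fun x hx => h x (List.mem_cons_of_mem _ hx)
      rw [show emitA (s :: rest) sid = renderA sid s ++ emitA rest (sid + 1) from rfl,
          List.map_cons,
          show emitB (toB s :: rest.map toB) sid = gfcRender sid (toB s) ++ emitB (rest.map toB) (sid + 1) from rfl,
          ih (sid + 1) hrest]
      cases s with
      | table r => rfl
      | text x => rfl
      | tail r => simp [isTail] at hs

lemma noTail_segsFromT (lines : List String) : ∀ cur, lines ≠ [] →
    PySem.Str.startswith (PySem.Str.strip (lines.getLastD "")) "|" = false →
    ∀ s ∈ segsFromT cur lines, isTail s = false := by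
  induction lines with
  | nil => intro cur h; exact absurd rfl h
  | cons line rest ih =>
      intro cur _ hlast s hs
      cases rest with
      | nil =>
          have hline : PySem.Str.startswith (PySem.Str.strip line) "|" = false := by
            simpa using hlast
          simp only [segsFromT, hline, Bool.false_eq_true, if_false] at hs
          rcases List.mem_append.mp hs with h1 | h1
          · rcases List.mem_append.mp h1 with h2 | h2
            · by_cases hc : cur = [] <;> simp [hc] at h2 <;> simp [h2, isTail]
            · by_cases he : PySem.Str.strip line = "" <;> simp [he] at h2 <;> simp [h2, isTail]
          · simp [segsFromT] at h1
      | cons l2 r2 =>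
          have hlast' : PySem.Str.startswith (PySem.Str.strip ((l2 :: r2).getLastD "")) "|" = false := by
            simpa using hlast
          by_cases hb : PySem.Str.startswith (PySem.Str.strip line) "|" = true
          · simp only [segsFromT, hb, if_true] at hs
            exact ih (cur ++ [line]) (by simp) hlast' s hs
          · simp only [segsFromT, hb, Bool.false_eq_true, if_false] at hs
            rcases List.mem_append.mp hs with h1 | h1
            · rcases List.mem_append.mp h1 with h2 | h2
              · by_cases hc : cur = [] <;> simp [hc] at h2 <;> simp [h2, isTail]
              · by_cases he : PySem.Str.strip line = "" <;> simp [he] at h2 <;> simp [h2, isTail]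
            · exact ih [] (by simp) hlast' s h1

-- ===== bridge: D_ (raw characters) ↔ strip/startswith of the last element of Python's split =====

lemma pvLastLine_cons_of_mem (c : Char) (rest : List Char) (h : '\n' ∈ rest) :
    pvLastLine (c :: rest) = pvLastLine rest := by
  unfold pvLastLine
  rw [List.reverse_cons, List.takeWhile_append, if_neg]
  intro hlen
  have hself : List.takeWhile (fun c => !(c == '\n')) rest.reverse = rest.reverse :=
    (List.takeWhile_prefix _).eq_of_length hlen
  have := List.takeWhile_eq_self_iff.mp hself '\n' (List.mem_reverse.mpr h)
  simp at this

lemma pvLastLine_of_not_mem (cs : List Char) (h : '\n' ∉ cs) : pvLastLine cs = cs := by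
  unfold pvLastLine
  rw [List.takeWhile_eq_self_iff.mpr, List.reverse_reverse]
  intro x hx
  have : x ≠ '\n' := fun he => h (he ▸ List.mem_reverse.mp hx)
  simp [this]

lemma pvLastLine_newline_cons (rest : List Char) (h : '\n' ∉ rest) :
    pvLastLine ('\n' :: rest) = rest := by
  unfold pvLastLine
  rw [List.reverse_cons, List.takeWhile_append, if_pos]
  · simp
  · rw [List.takeWhile_eq_self_iff.mpr]
    intro x hx
    have : x ≠ '\n' := fun he => h (he ▸ List.mem_reverse.mp hx)
    simp [this]

lemma goLast : ∀ (fuel : ℕ) (l cur : List Char) (acc : List (List Char)), l.length < fuel →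
    (PySem.Chars.splitOn.go ['\n'] fuel l cur acc).getLastD [] =
      if '\n' ∈ l then pvLastLine l else cur.reverse ++ l := by
  intro fuel
  induction fuel with
  | zero => intro l cur acc h; simp at h
  | succ fuel ih =>
      intro l cur acc h
      rw [PySem.Chars.splitOn.go.eq_def]
      cases l with
      | nil =>
          rw [if_neg (List.not_mem_nil)]
          show ((cur.reverse :: acc).reverse).getLastD [] = cur.reverse ++ []
          rw [List.getLastD_eq_getLast?, List.getLast?_reverse]
          simp
      | cons c rest =>
          by_cases hc : c = '\n'
          · subst hc
            have hpre : List.isPrefixOf ['\n'] ('\n' :: rest) = true := by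
              simp [List.isPrefixOf]
            simp only [hpre, if_pos]
            rw [show List.drop ['\n'].length ('\n' :: rest) = rest from rfl]
            rw [ih rest [] (cur.reverse :: acc) (by simp at h ⊢; omega)]
            by_cases hm : '\n' ∈ rest
            · rw [if_pos hm, if_pos (List.mem_cons_of_mem _ hm), pvLastLine_cons_of_mem _ _ hm]
            · rw [if_neg hm, if_pos (List.mem_cons_self ..), pvLastLine_newline_cons rest hm]
              simp
          · have hpre : List.isPrefixOf ['\n'] (c :: rest) = false := by
              simp [List.isPrefixOf]; exact fun he => hc he.symm
            simp only [hpre, Bool.false_eq_true, if_false]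
            rw [ih rest (c :: cur) acc (by simp at h ⊢; omega)]
            by_cases hm : '\n' ∈ rest
            · rw [if_pos hm, if_pos (List.mem_cons_of_mem _ hm), pvLastLine_cons_of_mem _ _ hm]
            · have : '\n' ∉ c :: rest := by simp [hm]; exact fun he => hc he.symm
              rw [if_neg hm, if_neg this]
              simp

lemma splitOn_last (cs : List Char) : (PySem.Chars.splitOn cs ['\n']).getLastD [] = pvLastLine cs := by
  unfold PySem.Chars.splitOn
  rw [goLast (cs.length + 1) cs [] [] (by omega)]
  by_cases h : '\n' ∈ cs
  · rw [if_pos h]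
  · rw [if_neg h, pvLastLine_of_not_mem cs h]; simp

lemma lastline_str (s : String) :
    ((((PySem.Str.split? s "\n").getD []).getLastD "")).toList = pvLastLine s.toList := by
  have hm := PySem.Str.split?_map s "\n"
  cases hs : PySem.Str.split? s "\n" with
  | none =>
      rw [hs] at hm
      simp [PySem.Chars.split?] at hm
  | some L =>
      rw [hs] at hm
      have hL : L.map String.toList = PySem.Chars.splitOn s.toList "\n".toList := by
        simp [PySem.Chars.split?] at hm
        exact hm
      have hlist : "\n".toList = ['\n'] := rfl
      rw [hlist] at hL
      have := splitOn_last s.toList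
      rw [← hL] at this
      rw [List.getLastD_eq_getLast?, List.getLast?_map] at this
      simp only [hs, Option.getD_some]
      rw [List.getLastD_eq_getLast?]
      cases hgl : L.getLast? with
      | none => rw [hgl] at this; simpa using this
      | some a => rw [hgl] at this; simpa using this

lemma singleton_prefix_iff (a : Char) (l : List Char) : [a] <+: l ↔ l.head? = some a := by
  cases l with
  | nil => simp
  | cons c t => simp [List.cons_prefix_cons, eq_comm]

lemma strip_head? (l : List Char) :
    (PySem.Chars.strip l).head? = (l.dropWhile PySem.Chars.isspace).head? := by
  unfold PySem.Chars.strip PySem.Chars.rstrip PySem.Chars.lstrip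
  cases hd : l.dropWhile PySem.Chars.isspace with
  | nil => simp [hd]
  | cons c t =>
      have hc : PySem.Chars.isspace c = false := by
        have := List.head_dropWhile_not PySem.Chars.isspace (l := l) (by simp [hd])
        simpa [hd] using this
      rw [List.reverse_cons, List.dropWhile_append]
      by_cases he : (t.reverse.dropWhile PySem.Chars.isspace).isEmpty = true
      · rw [if_pos he]
        simp [hc]
      · rw [if_neg he]
        rw [List.reverse_append]
        simp

lemma tline_iff (t : String) :
    (PySem.Str.startswith (PySem.Str.strip t) "|" = true) ↔
      ((t.toList.dropWhile PySem.Chars.isspace).head? = some '|') := by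
  rw [PySem.Str.startswith_eq, PySem.Str.toList_strip,
      show ("|" : String).toList = ['|'] from rfl,
      PySem.Chars.startswith_iff, singleton_prefix_iff, strip_head?]

-- ===== VERDICT (by name: the statements are the Claim_ definitions above) =====
theorem generate_faithful_content_spec : Claim_unchanged_generate_faithful_content := by
  intro document_text tables _ hnd
  have hlast : PySem.Str.startswith (PySem.Str.strip ((((PySem.Str.split? document_text "\n").getD []).getLastD ""))) "|" = false := by
    unfold D_generate_faithful_content at hnd
    apply Bool.eq_false_iff.mpr
    intro hT
    have hh := (tline_iff _).mp hT
    rw [lastline_str document_text] at hh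
    exact hnd hh
  show finishA (((PySem.Str.split? document_text "\n").getD []).foldl gfcStep ("", [], 0))
        = PySem.Str.join ""
            ((PySem.List.enumerate (gfcSegments ((PySem.Str.split? document_text "\n").getD [])) 0).map
              (fun p => gfcRender p.1 p.2))
  obtain ⟨lines, hl⟩ : ∃ l, (PySem.Str.split? document_text "\n").getD [] = l := ⟨_, rfl⟩
  rw [hl] at hlast ⊢
  have hB : gfcSegments lines = segsFromB [] lines := by
    unfold gfcSegments
    have := segLoop_eq lines [] []
    simpa [flushSegs] using this
  rw [hB, joinEmit, aLoop_eq]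
  by_cases hln : lines = []
  · subst hln; simp [segsFromT, segsFromB, emitA, emitB]
  · have hnt : ∀ s ∈ segsFromT [] lines, isTail s = false := noTail_segsFromT lines [] hln hlast
    have key : emitA (segsFromT [] lines) 0 = emitB (segsFromB [] lines) 0 := by
      rw [emit_map (segsFromT [] lines) 0 hnt, map_toB_segsFromT]
    simp [key]

set_option maxRecDepth 100000 in
set_option maxHeartbeats 4000000 in
theorem generate_faithful_content_changed : Claim_changed_generate_faithful_content := by
  unfold Claim_changed_generate_faithful_content; decide

-- ===== tightness: inside D_, the trailing table run makes the outputs differ =====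

lemma emitA_snoc (M : List SegT) (x : SegT) : ∀ (sid : Int),
    emitA (M ++ [x]) sid = emitA M sid ++ renderA (sid + M.length) x := by
  induction M with
  | nil =>
      intro sid
      show renderA sid x ++ emitA [] (sid + 1) = "" ++ renderA (sid + ((0 : Nat) : Int)) x
      simp [emitA]
  | cons s rest ih =>
      intro sid
      show renderA sid s ++ emitA (rest ++ [x]) (sid + 1)
        = (renderA sid s ++ emitA rest (sid + 1)) ++ renderA (sid + ((rest.length + 1 : Nat) : Int)) x
      rw [ih (sid + 1), String.append_assoc]
      have harg : sid + 1 + (rest.length : Int) = sid + ((rest.length + 1 : Nat) : Int) := by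
        push_cast; ring
      rw [harg]

lemma emitB_snoc (M : List GfcSeg) (x : GfcSeg) : ∀ (sid : Int),
    emitB (M ++ [x]) sid = emitB M sid ++ gfcRender (sid + M.length) x := by
  induction M with
  | nil =>
      intro sid
      show gfcRender sid x ++ emitB [] (sid + 1) = "" ++ gfcRender (sid + ((0 : Nat) : Int)) x
      simp [emitB]
  | cons s rest ih =>
      intro sid
      show gfcRender sid s ++ emitB (rest ++ [x]) (sid + 1)
        = (gfcRender sid s ++ emitB rest (sid + 1)) ++ gfcRender (sid + ((rest.length + 1 : Nat) : Int)) x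
      rw [ih (sid + 1), String.append_assoc]
      have harg : sid + 1 + (rest.length : Int) = sid + ((rest.length + 1 : Nat) : Int) := by
        push_cast; ring
      rw [harg]

lemma tail_segsFromT (lines : List String) : ∀ cur, lines ≠ [] →
    PySem.Str.startswith (PySem.Str.strip (lines.getLastD "")) "|" = true →
    ∃ M r, segsFromT cur lines = M ++ [SegT.tail r] ∧ (∀ s ∈ M, isTail s = false) := by
  induction lines with
  | nil => intro cur h; exact absurd rfl h
  | cons line rest ih =>
      intro cur _ hlast
      cases rest with
      | nil =>
          have hline : PySem.Str.startswith (PySem.Str.strip line) "|" = true := by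
            simpa using hlast
          refine ⟨[], cur ++ [line], ?_, by simp⟩
          simp only [segsFromT]
          rw [if_pos hline]
          simp [segsFromT]
      | cons l2 r2 =>
          have hlast' : PySem.Str.startswith (PySem.Str.strip ((l2 :: r2).getLastD "")) "|" = true := by
            simpa using hlast
          by_cases hb : PySem.Str.startswith (PySem.Str.strip line) "|" = true
          · obtain ⟨M, r, heq, hM⟩ := ih (cur ++ [line]) (by simp) hlast'
            refine ⟨M, r, ?_, hM⟩
            rw [segsFromT, if_pos hb]
            exact heq
          · obtain ⟨M, r, heq, hM⟩ := ih [] (by simp) hlast'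
            refine ⟨(if cur ≠ [] then [SegT.table cur] else []) ++
                    (if PySem.Str.strip line ≠ "" then [SegT.text line] else []) ++ M, r, ?_, ?_⟩
            · rw [segsFromT, if_neg hb, heq]
              simp [List.append_assoc]
            · intro s hs
              rcases List.mem_append.mp hs with h1 | h1
              · rcases List.mem_append.mp h1 with h2 | h2
                · by_cases hc : cur = [] <;> simp [hc] at h2 <;> simp [h2, isTail]
                · by_cases he : PySem.Str.strip line = "" <;> simp [he] at h2 <;> simp [h2, isTail]
              · exact hM s h1

lemma sections_ne (k : Int) (h : String) : tailTableSection k h ≠ tableSection k h := by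
  intro he
  have h9 := congrArg (fun s => s.toList[9]?) he
  simp only [tailTableSection, tableSection, String.toList_append, List.append_assoc] at h9
  rw [List.getElem?_append_left (by decide), List.getElem?_append_left (by decide)] at h9
  simp at h9

lemma append_right_ne (P X Y : String) (h : X ≠ Y) : P ++ X ≠ P ++ Y := by
  intro he
  apply h
  apply String.toList_inj.mp
  have := congrArg String.toList he
  rw [String.toList_append, String.toList_append] at this
  exact List.append_cancel_left this

theorem generate_faithful_content_tight : Claim_exact_generate_faithful_content := by
  intro document_text tables _ hd
  unfold D_generate_faithful_content at hd
  have hlast : PySem.Str.startswith (PySem.Str.strip ((((PySem.Str.split? document_text "\n").getD []).getLastD ""))) "|" = true := by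
    apply (tline_iff _).mpr
    rw [lastline_str document_text]
    exact hd
  show finishA (((PySem.Str.split? document_text "\n").getD []).foldl gfcStep ("", [], 0))
        ≠ PySem.Str.join ""
            ((PySem.List.enumerate (gfcSegments ((PySem.Str.split? document_text "\n").getD [])) 0).map
              (fun p => gfcRender p.1 p.2))
  obtain ⟨lines, hl⟩ : ∃ l, (PySem.Str.split? document_text "\n").getD [] = l := ⟨_, rfl⟩
  rw [hl] at hlast ⊢
  have hnil : lines ≠ [] := by
    intro he
    rw [he] at hlast
    simp at hlast
    exact absurd hlast (by decide)
  have hB : gfcSegments lines = segsFromB [] lines := by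
    unfold gfcSegments
    have := segLoop_eq lines [] []
    simpa [flushSegs] using this
  rw [hB, joinEmit, aLoop_eq]
  obtain ⟨M, r, heq, hM⟩ := tail_segsFromT lines [] hnil hlast
  rw [heq]
  have hBeq : segsFromB [] lines = M.map toB ++ [GfcSeg.table r] := by
    rw [← map_toB_segsFromT, heq]
    simp [toB]
  rw [hBeq, emitA_snoc, emitB_snoc, ← emit_map M 0 hM]
  simp only [List.length_map]
  have h0 : ∀ s : String, "" ++ s = s := fun s => by simp
  rw [h0]
  apply append_right_ne
  exact sections_ne _ _
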